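-- pv_equiv track=rewrite | github.com/nightbloom22/Reuters | utils.py | get_most_important_topics
-- ===== SOURCE A (Python) =====
-- def get_most_important_topics(docs, places):
--     topic_list = []
--     for doc in docs:
--
--         topic_list.extend(doc[0])
--     topic_list = [i for i in topic_list if i not in places]
--
--     from collections import Counter
--
--     data = Counter(topic_list)
--
--     topics = []
--     for i in data.most_common(10):
--         topics.append(i[0])
--     #topics = [i for i in topics if i != 'wheat']
--
--     return topics
-- ===== SOURCE B (Python) =====
-- def get_most_important_topics(docs, places):
--     # Selection instead of histogram-sort: enumerate distinct candidate topics
--     # (first-occurrence order), score each by re-scanning the docs, and pick the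
--     # top 10 by repeated extraction of the first maximum (Python's max is the
--     # first maximal element, which reproduces most_common's stable tie order).
--     def score(t):
--         return sum(doc[0].count(t) for doc in docs)
--
--     candidates = list(dict.fromkeys(
--         t for doc in docs for t in doc[0] if t not in places))
--
--     topics = []
--     while candidates and len(topics) < 10:
--         best = max(candidates, key=score)
--         topics.append(best)
--         candidates.remove(best)
--     return topics
-- ===== Notes on version B (the rewrite author's own statement) =====
-- stated objective: alternative
-- what changed: B builds no histogram and does no sort: it enumerates the distinct candidate topics in first-occurrence order, scores each candidate by re-scanning the docs with list.count, and picks the top 10 by repeated extraction of the first maximum (selection), instead of A's flatten + Counter + most_common pipeline.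
import Mathlib
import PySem

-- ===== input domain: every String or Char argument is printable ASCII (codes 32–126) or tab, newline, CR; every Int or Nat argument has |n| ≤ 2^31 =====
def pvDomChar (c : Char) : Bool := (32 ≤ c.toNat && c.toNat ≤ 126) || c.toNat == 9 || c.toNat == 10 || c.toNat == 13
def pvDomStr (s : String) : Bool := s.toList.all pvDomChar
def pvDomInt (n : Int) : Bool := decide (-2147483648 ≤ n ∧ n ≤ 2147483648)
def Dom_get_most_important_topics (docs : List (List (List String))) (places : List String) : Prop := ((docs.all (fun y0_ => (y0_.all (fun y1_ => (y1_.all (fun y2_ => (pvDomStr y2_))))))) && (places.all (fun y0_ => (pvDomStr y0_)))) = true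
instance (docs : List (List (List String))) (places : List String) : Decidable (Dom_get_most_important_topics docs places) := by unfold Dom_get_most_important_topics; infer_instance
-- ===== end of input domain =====

-- B replaces A's flatten + Counter + most_common pipeline by selection: it lists the distinct
-- candidate topics in first-occurrence order, scores each by re-scanning the docs, and extracts
-- the first maximum ten times (objective: alternative algorithm, no speed claim).

-- ===== PORT A =====
-- topic_list built by extend; doc[0] raises IndexError on an empty doc (pyGet? = none),
-- excluded by Pre_; Counter = PySem.Dict.counter; most_common(10) = stable reverse sort
-- on the count then take 10 (heapq.nlargest semantics).
def get_most_important_topics (docs : List (List (List String))) (places : List String) : List String :=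
  let topic_list := docs.foldl (fun acc doc => acc ++ (PySem.List.pyGet? doc 0).getD []) []
  let topic_list := topic_list.filter (fun i => !places.contains i)
  let data := PySem.Dict.counter topic_list
  let topics := ((PySem.List.sorted data.items (fun kv => kv.2) true).take 10).foldl
      (fun acc i => acc ++ [i.1]) []
  topics

-- ===== PORT B =====
-- score(t) = sum(doc[0].count(t) for doc in docs)
def pvScore (docs : List (List (List String))) (t : String) : Int :=
  (docs.map (fun doc => (PySem.List.count ((PySem.List.pyGet? doc 0).getD []) t : Int))).sum

-- the while loop: max? [] = none exactly when candidates is empty (loop exit);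
-- best is always a member of candidates, so remove? is always some and .getD [] is unreachable.
def pvSelect (score : String → Int) : Nat → List String → List String
  | 0, _ => []
  | n+1, cands =>
    match PySem.List.max? cands score with
    | none => []
    | some best => best :: pvSelect score n ((PySem.List.remove? cands best).getD [])

def get_most_important_topics_alt (docs : List (List (List String))) (places : List String) : List String :=
  let candidates := PySem.List.dedup
      (docs.flatMap (fun doc => ((PySem.List.pyGet? doc 0).getD []).filter (fun t => !places.contains t)))
  pvSelect (pvScore docs) 10 candidates

-- ===== PRECONDITION & SPEC =====
-- Pre_ excludes exactly the inputs where A raises IndexError: a doc with no topic lists (doc[0]).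
def Pre_get_most_important_topics (docs : List (List (List String))) (places : List String) : Prop :=
  ∀ doc ∈ docs, doc ≠ []
instance (docs : List (List (List String))) (places : List String) : Decidable (Pre_get_most_important_topics docs places) := by unfold Pre_get_most_important_topics; infer_instance

def pvWitness_get_most_important_topics : List (List (List String)) × List String :=
  ([[["grain", "wheat"]], [["grain"], ["x"]]], ["usa"])

def Spec_get_most_important_topics (docs : List (List (List String))) (places : List String) (out : List String) : Prop := out = get_most_important_topics_alt docs places
instance (docs : List (List (List String))) (places : List String) (out : List String) : Decidable (Spec_get_most_important_topics docs places out) := by unfold Spec_get_most_important_topics; infer_instance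

-- ===== CLAIM (what is proved, stated in full; the proofs are below) =====
def Claim_equal_get_most_important_topics : Prop := ∀ (docs : List (List (List String))) (places : List String), Dom_get_most_important_topics docs places → Pre_get_most_important_topics docs places → Spec_get_most_important_topics docs places (get_most_important_topics docs places)

-- ===== LEMMAS AND PROOFS =====

-- A's extend-loop is the flatten of the first sublists.
theorem pv_foldl_append_heads (docs : List (List (List String))) (acc : List String) :
    docs.foldl (fun acc doc => acc ++ (PySem.List.pyGet? doc 0).getD []) acc
      = acc ++ docs.flatMap (fun doc => (PySem.List.pyGet? doc 0).getD []) := by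
  induction docs generalizing acc with
  | nil => simp
  | cons d ds ih => simp [ih, List.flatMap_cons]

-- filtering each chunk then flattening = flattening then filtering
theorem pv_flatMap_filter {α : Type} (p : String → Bool) (g : α → List String) (docs : List α) :
    docs.flatMap (fun doc => (g doc).filter p) = (docs.flatMap g).filter p := by
  induction docs with
  | nil => rfl
  | cons x xs ih => simp [List.flatMap_cons, List.filter_append, ih]

-- A's append loop over most_common is a map of first components
theorem pv_foldl_map_fst (xs : List (String × Int)) (acc : List String) :
    xs.foldl (fun acc i => acc ++ [i.1]) acc = acc ++ xs.map (fun kv => kv.1) := by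
  induction xs generalizing acc with
  | nil => simp
  | cons x xs ih => simp [ih]

-- B's per-doc count sum is the count in the flattened stream
theorem pv_score_eq_count (docs : List (List (List String))) (t : String) :
    pvScore docs t
      = ((docs.flatMap (fun doc => (PySem.List.pyGet? doc 0).getD [])).count t : Int) := by
  induction docs with
  | nil => simp [pvScore]
  | cons d ds ih =>
    simp [pvScore, List.flatMap_cons, List.count_append, PySem.List.count] at *
    omega

-- insertBy commutes with map when 'before' only looks through the map
theorem pv_insertBy_map {α β : Type} (bef : β → β → Bool) (bef' : α → α → Bool)
    (f : α → β) (h : ∀ a b, bef (f a) (f b) = bef' a b) (x : α) (ys : List α) :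
    PySem.List.insertBy bef (f x) (ys.map f) = (PySem.List.insertBy bef' x ys).map f := by
  induction ys with
  | nil => simp [PySem.List.insertBy]
  | cons y ys ih =>
    simp only [List.map_cons, PySem.List.insertBy, h]
    by_cases hb : bef' x y <;> simp [hb, ih]

-- reverse sort of a mapped list = map of reverse sort by the composed key
theorem pv_sorted_map {α β : Type} (f : α → β) (key : β → Int) (xs : List α) :
    PySem.List.sorted (xs.map f) key true
      = (PySem.List.sorted xs (fun x => key (f x)) true).map f := by
  rw [PySem.List.sorted_rev_eq_foldl_insertBy, PySem.List.sorted_rev_eq_foldl_insertBy,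
    List.foldl_map]
  suffices h : ∀ acc : List α,
      List.foldl (fun acc x => PySem.List.insertBy (fun a b => decide (key b < key a)) (f x) acc)
        (acc.map f) xs
      = (List.foldl (fun acc x => PySem.List.insertBy (fun a b => decide (key (f b) < key (f a))) x acc)
          acc xs).map f by
    simpa using h []
  induction xs with
  | nil => simp
  | cons x xs ih =>
    intro acc
    simp only [List.foldl_cons]
    rw [pv_insertBy_map (fun a b => decide (key b < key a))
      (fun a b => decide (key (f b) < key (f a))) f (fun a b => rfl) x acc]
    exact ih _
-- max? over an appended element
theorem pv_max?_append_singleton {α : Type} (key : α → Int) (ys : List α) (x : α) :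
    PySem.List.max? (ys ++ [x]) key
      = some (match PySem.List.max? ys key with
              | none => x
              | some m => if key m < key x then x else m) := by
  unfold PySem.List.max?
  rw [List.foldl_append]
  generalize List.foldl _ none ys = r
  cases r with
  | none => rfl
  | some m =>
    show (if key m < key x then some x else some m) = _
    split <;> rename_i hc <;> simp [hc]

theorem pv_max?_eq_none {α : Type} (key : α → Int) (xs : List α) :
    PySem.List.max? xs key = none ↔ xs = [] := by
  induction xs using List.reverseRecOn with
  | nil => simp [PySem.List.max?]
  | append_singleton ys x ih => rw [pv_max?_append_singleton]; simp

theorem pv_max?_mem {α : Type} (key : α → Int) (xs : List α) (m : α)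
    (h : PySem.List.max? xs key = some m) : m ∈ xs := by
  induction xs using List.reverseRecOn generalizing m with
  | nil => simp [PySem.List.max?] at h
  | append_singleton ys x ih =>
    rw [pv_max?_append_singleton] at h
    cases hm : PySem.List.max? ys key with
    | none => simp [hm] at h; simp [h]
    | some m0 =>
      simp only [hm, Option.some.injEq] at h
      by_cases hlt : key m0 < key x
      · simp [hlt] at h; simp [h]
      · simp [hlt] at h; subst h; exact List.mem_append_left _ (ih m0 hm)

-- max? is congruent in the key on members
theorem pv_max?_congr {α : Type} (k1 k2 : α → Int) (xs : List α)
    (h : ∀ x ∈ xs, k1 x = k2 x) :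
    PySem.List.max? xs k1 = PySem.List.max? xs k2 := by
  induction xs using List.reverseRecOn with
  | nil => rfl
  | append_singleton ys x ih =>
    have hys : ∀ y ∈ ys, k1 y = k2 y := fun y hy => h y (List.mem_append_left _ hy)
    rw [pv_max?_append_singleton, pv_max?_append_singleton, ih hys]
    cases hm : PySem.List.max? ys k2 with
    | none => rfl
    | some m =>
      have hmem := pv_max?_mem k2 ys m hm
      show some (if k1 m < k1 x then x else m) = some (if k2 m < k2 x then x else m)
      rw [hys m hmem, h x (by simp)]

-- remove? on a member is erase
theorem pv_remove_getD {α : Type} [BEq α] [LawfulBEq α] (xs : List α) (m : α) (h : m ∈ xs) :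
    (PySem.List.remove? xs m).getD [] = xs.erase m := by
  rw [PySem.List.remove?, List.erase_eq_eraseIdx]
  cases hi : List.idxOf? m xs with
  | none => rw [List.idxOf?_eq_none_iff] at hi; exact absurd h hi
  | some i => simp

-- reverse sort of an appended element is an insertBy into the reverse sort
theorem pv_sorted_append_singleton {α : Type} (key : α → Int) (zs : List α) (x : α) :
    PySem.List.sorted (zs ++ [x]) key true
      = PySem.List.insertBy (fun a b => decide (key b < key a)) x
          (PySem.List.sorted zs key true) := by
  rw [PySem.List.sorted_rev_eq_foldl_insertBy, PySem.List.sorted_rev_eq_foldl_insertBy,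
    List.foldl_append]
  rfl

-- the head of the stable reverse sort of a nodup list is the FIRST maximum,
-- and the tail is the reverse sort of the rest
theorem pv_sorted_head_max {α : Type} [BEq α] [LawfulBEq α] (key : α → Int) (xs : List α) (m : α)
    (hnd : xs.Nodup) (h : PySem.List.max? xs key = some m) :
    PySem.List.sorted xs key true = m :: PySem.List.sorted (xs.erase m) key true := by
  induction xs using List.reverseRecOn generalizing m with
  | nil => simp [PySem.List.max?] at h
  | append_singleton ys x ih =>
    rw [pv_max?_append_singleton] at h
    have hsnil : PySem.List.sorted ([] : List α) key true = [] := by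
      rw [PySem.List.sorted_rev_eq_foldl_insertBy]; rfl
    cases hm : PySem.List.max? ys key with
    | none =>
      have hys : ys = [] := (pv_max?_eq_none key ys).mp hm
      subst hys
      simp only [hm, Option.some.injEq] at h
      subst h
      rw [pv_sorted_append_singleton, hsnil]
      simp [PySem.List.insertBy, hsnil, List.erase_cons_head]
    | some m0 =>
      simp only [hm, Option.some.injEq] at h
      have hm0ys : m0 ∈ ys := pv_max?_mem key ys m0 hm
      have hndys : ys.Nodup := hnd.of_append_left
      have hxys : x ∉ ys := fun hx => List.disjoint_of_nodup_append hnd hx (by simp)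
      rw [pv_sorted_append_singleton, ih m0 hndys hm]
      by_cases hlt : key m0 < key x
      · simp only [if_pos hlt] at h
        subst h
        rw [List.erase_append_right _ hxys]
        simp only [List.erase_cons_head, List.append_nil]
        rw [ih m0 hndys hm]
        simp [PySem.List.insertBy, hlt]
      · simp only [if_neg hlt] at h
        subst h
        rw [List.erase_append_left _ hm0ys, pv_sorted_append_singleton]
        simp [PySem.List.insertBy, hlt]

-- the selection loop computes take n of the stable reverse sort
theorem pv_select_eq_take (key : String → Int) (n : Nat) (xs : List String) (hnd : xs.Nodup) :
    pvSelect key n xs = (PySem.List.sorted xs key true).take n := by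
  induction n generalizing xs with
  | zero => simp [pvSelect]
  | succ n ih =>
    cases hm : PySem.List.max? xs key with
    | none =>
      have : xs = [] := (pv_max?_eq_none key xs).mp hm
      subst this
      rw [PySem.List.sorted_rev_eq_foldl_insertBy]
      simp [pvSelect, hm]
    | some m =>
      have hmem := pv_max?_mem key xs m hm
      rw [pv_sorted_head_max key xs m hnd hm]
      simp only [pvSelect, hm, List.take_succ_cons]
      rw [pv_remove_getD xs m hmem]
      exact congrArg _ (ih (xs.erase m) (hnd.erase m))

-- pvSelect is congruent in the key on members of the candidate list
theorem pv_select_congr (k1 k2 : String → Int) (n : Nat) (xs : List String)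
    (h : ∀ x ∈ xs, k1 x = k2 x) :
    pvSelect k1 n xs = pvSelect k2 n xs := by
  induction n generalizing xs with
  | zero => rfl
  | succ n ih =>
    simp only [pvSelect, pv_max?_congr k1 k2 xs h]
    cases hm : PySem.List.max? xs k2 with
    | none => rfl
    | some m =>
      have hmem := pv_max?_mem k2 xs m hm
      show m :: pvSelect k1 n ((PySem.List.remove? xs m).getD [])
         = m :: pvSelect k2 n ((PySem.List.remove? xs m).getD [])
      rw [pv_remove_getD xs m hmem]
      exact congrArg _ (ih (xs.erase m) (fun x hx => h x (List.mem_of_mem_erase hx)))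

-- ===== VERDICT (by name: the statement is the Claim_ definition above) =====
theorem get_most_important_topics_spec : Claim_equal_get_most_important_topics := by
  intro docs places _ _
  unfold Spec_get_most_important_topics get_most_important_topics get_most_important_topics_alt
  simp only [pv_foldl_append_heads, List.nil_append, PySem.Dict.items_counter,
    pv_flatMap_filter, PySem.List.dedup_eq_ofList]
  set tl := (docs.flatMap (fun doc => (PySem.List.pyGet? doc 0).getD [])).filter
      (fun i => !places.contains i) with htl
  rw [pv_sorted_map (fun k => (k, (tl.count k : Int))) (fun kv => kv.2) (PySem.Set.ofList tl)]
  rw [← List.map_take, pv_foldl_map_fst, List.nil_append, List.map_map]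
  have h1 : ((fun kv : String × Int => kv.1) ∘ fun k => (k, (tl.count k : Int))) = id := rfl
  rw [h1, List.map_id]
  rw [pv_select_congr (pvScore docs) (fun t => (tl.count t : Int)) 10 (PySem.Set.ofList tl)
    (by
      intro t ht
      rw [PySem.Set.mem_ofList] at ht
      have hpred := (List.mem_filter.mp ht).2
      rw [pv_score_eq_count,
        ← List.count_filter (p := fun i => !places.contains i)
          (l := docs.flatMap (fun doc => (PySem.List.pyGet? doc 0).getD [])) hpred])]
  rw [pv_select_eq_take _ 10 _ (by
    have := PySem.List.nodup_dedup tl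
    rwa [PySem.List.dedup_eq_ofList] at this)]
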